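-- pv_equiv track=rewrite | github.com/DenisUstinov/salary-slip-bot | salary_slip_bot/handlers/lists.py | transform_lists_to_dict
-- ===== SOURCE A (Python) =====
-- from typing import List, Dict, Tuple
--
-- def transform_lists_to_dict(lists: List[Tuple[int, str, str]]) -> Dict[str, List[str]]:
--     result_dict = {}
--     for record in lists:
--         _, header, item = record
--         if header not in result_dict:
--             result_dict[header] = []
--         result_dict[header].append(item)
--
--     return result_dict
-- ===== SOURCE B (Python) =====
-- def transform_lists_to_dict(lists):
--     headers = list(dict.fromkeys(h for _, h, _ in lists))
--     return {h: [item for _, hh, item in lists if hh == h] for h in headers}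
-- ===== Notes on version B (the rewrite author's own statement) =====
-- stated objective: alternative
-- what changed: Replaced the single-pass incremental dict-of-lists building with a two-phase decomposition: dedup the headers in first-occurrence order, then build each group's item list with a per-header filtering comprehension.
import Mathlib
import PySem

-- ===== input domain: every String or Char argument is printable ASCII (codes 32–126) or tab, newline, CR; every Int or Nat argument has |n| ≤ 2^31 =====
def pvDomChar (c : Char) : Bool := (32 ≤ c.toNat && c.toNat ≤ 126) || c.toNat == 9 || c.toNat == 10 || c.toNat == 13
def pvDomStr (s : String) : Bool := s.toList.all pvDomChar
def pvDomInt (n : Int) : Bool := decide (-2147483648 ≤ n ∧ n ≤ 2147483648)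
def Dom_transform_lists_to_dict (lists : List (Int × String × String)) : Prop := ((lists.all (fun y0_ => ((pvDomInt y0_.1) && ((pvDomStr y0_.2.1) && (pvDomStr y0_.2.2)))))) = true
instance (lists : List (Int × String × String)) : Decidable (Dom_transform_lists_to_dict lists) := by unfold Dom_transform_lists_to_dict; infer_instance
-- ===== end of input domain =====

-- B groups the records by header with a two-phase decomposition (dedup the headers,
-- then a per-header filter pass) instead of A's single-pass incremental dict building;
-- same value (dict as assoc list in first-occurrence key order) on every input.

-- ===== PORT A =====
-- single pass: result_dict[header] gets [] on first sight, then item is appended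
def transform_lists_to_dict (lists : List (Int × String × String)) : List (String × List String) :=
  (lists.foldl
    (fun d r =>
      let d1 := if d.contains r.2.1 then d else d.insert r.2.1 []
      d1.modify r.2.1 [] (fun v => v ++ [r.2.2]))     -- result_dict[header].append(item)
    PySem.Dict.empty).items

-- ===== PORT B =====
-- headers = list(dict.fromkeys(h for _,h,_ in lists)); dict comprehension over the
-- (distinct) headers, so its items list is exactly this map
def transform_lists_to_dict_alt (lists : List (Int × String × String)) : List (String × List String) :=
  (PySem.List.dedup (lists.map (fun r => r.2.1))).map
    (fun h => (h, (lists.filter (fun r => r.2.1 == h)).map (fun r => r.2.2)))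

-- ===== PRECONDITION & SPEC =====
def Spec_transform_lists_to_dict (lists : List (Int × String × String)) (out : List (String × List String)) : Prop := out = transform_lists_to_dict_alt lists
instance (lists : List (Int × String × String)) (out : List (String × List String)) : Decidable (Spec_transform_lists_to_dict lists out) := by unfold Spec_transform_lists_to_dict; infer_instance

-- ===== CLAIM (what is proved, stated in full; the proofs are below) =====
def Claim_equal_transform_lists_to_dict : Prop := ∀ (lists : List (Int × String × String)), Dom_transform_lists_to_dict lists → Spec_transform_lists_to_dict lists (transform_lists_to_dict lists)

-- ===== LEMMAS AND PROOFS =====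

-- A's step ('if absent insert []; then append') is exactly d[h] = d.get(h, []) + [item]
theorem stepA_eq_modify (d : PySem.Dict String (List String)) (h it : String) :
    (if d.contains h then d else d.insert h []).modify h [] (fun v => v ++ [it])
      = d.modify h [] (fun v => v ++ [it]) := by
  by_cases hc : d.contains h
  · simp [hc]
  · have hc' : d.contains h = false := by simpa using hc
    simp [PySem.Dict.modify, hc', PySem.Dict.getD_insert_self,
      PySem.Dict.insert_insert_self, PySem.Dict.getD_of_not_contains d ([] : List String) hc']

theorem transform_lists_to_dict_eq_alt (lists : List (Int × String × String)) :
    transform_lists_to_dict lists = transform_lists_to_dict_alt lists := by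
  unfold transform_lists_to_dict transform_lists_to_dict_alt
  have hstep : (fun (d : PySem.Dict String (List String)) (r : Int × String × String) =>
      let d1 := if d.contains r.2.1 then d else d.insert r.2.1 []
      d1.modify r.2.1 [] (fun v => v ++ [r.2.2]))
      = fun d r => d.modify r.2.1 [] (fun v => v ++ [r.2.2]) := by
    funext d r; exact stepA_eq_modify d r.2.1 r.2.2
  rw [hstep]
  set D : PySem.Dict String (List String) :=
    lists.foldl (fun d r => d.modify r.2.1 [] (fun v => v ++ [r.2.2])) PySem.Dict.empty with hD
  have hkeys : D.keys = PySem.List.dedup (lists.map (fun r => r.2.1)) := by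
    rw [hD,
      PySem.Dict.keys_foldl_modify_key lists (fun r => r.2.1) []
        (fun _ r => (fun v => v ++ [r.2.2])) PySem.Dict.empty]
    rw [PySem.Dict.keys_empty, PySem.Set.update_nil_left, PySem.List.dedup_eq_ofList]
  have hnd : D.keys.Nodup := by
    rw [hkeys]; exact PySem.List.nodup_dedup _
  have hget : ∀ c, D.getD c [] = (lists.filter (fun r => r.2.1 == c)).map (fun r => r.2.2) := by
    intro c
    have hmap : lists.foldl (fun d r => d.modify r.2.1 [] (fun v => v ++ [r.2.2])) PySem.Dict.empty
        = (lists.map (fun r => (r.2.1, r.2.2))).foldl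
            (fun d p => d.modify p.1 [] (fun v => v ++ [p.2])) PySem.Dict.empty := by
      rw [List.foldl_map]
    rw [hD, hmap, PySem.Dict.getD_foldl_modify_append]
    simp [List.filter_map, Function.comp_def]
  rw [PySem.Dict.items_eq_map_keys D hnd [], hkeys]
  exact List.map_congr_left fun h _ => by rw [hget h]

-- ===== VERDICT (by name: the statement is the Claim_ definition above) =====
theorem transform_lists_to_dict_spec : Claim_equal_transform_lists_to_dict := by
  intro lists _
  exact transform_lists_to_dict_eq_alt lists
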